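-- pv_equiv track=rewrite | github.com/jtecklenburg/voromesh | io/meshwriter.py | elementnames
-- ===== SOURCE A (Python) =====
-- def elementnames(nel):
--
--     alphabet = "0123456789ABCDEFGHIJKLMNOPQRSTUVWXYZ"
--
--     def num2base(number, base=35):
--         res = ""
--         while number:
--             ind = number % base
--             res = res + alphabet[ind]
--             number = number // base
--         return res[::-1] or "0"
--
--     def toughname(number):
--         (a, b) = divmod(number, 100)
--         return num2base(a).zfill(3) + format(b, '02d')
--
--     return [toughname(a) for a in range(nel)]
-- ===== SOURCE B (Python) =====
-- def elementnames(nel):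
--
--     alphabet = "0123456789ABCDEFGHIJKLMNOPQRSTUVWXYZ"
--
--     def num2base(number, base=35):
--         res = ""
--         while number:
--             ind = number % base
--             res = res + alphabet[ind]
--             number = number // base
--         return res[::-1] or "0"
--
--     names = []
--     a = 0
--     remaining = nel
--     while remaining > 0:
--         prefix = num2base(a).zfill(3)
--         for b in range(min(100, remaining)):
--             names.append(prefix + format(b, '02d'))
--         remaining -= min(100, remaining)
--         a += 1
--     return names
-- ===== Notes on version B (the rewrite author's own statement) =====
-- stated objective: alternative
-- what changed: B iterates over fixed-size blocks, computing the base-35/zfill prefix once per block and appending the two-digit suffixes in an inner loop with a partial final block, instead of A's flat comprehension recomputing the base conversion for every element.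
import Mathlib
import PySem

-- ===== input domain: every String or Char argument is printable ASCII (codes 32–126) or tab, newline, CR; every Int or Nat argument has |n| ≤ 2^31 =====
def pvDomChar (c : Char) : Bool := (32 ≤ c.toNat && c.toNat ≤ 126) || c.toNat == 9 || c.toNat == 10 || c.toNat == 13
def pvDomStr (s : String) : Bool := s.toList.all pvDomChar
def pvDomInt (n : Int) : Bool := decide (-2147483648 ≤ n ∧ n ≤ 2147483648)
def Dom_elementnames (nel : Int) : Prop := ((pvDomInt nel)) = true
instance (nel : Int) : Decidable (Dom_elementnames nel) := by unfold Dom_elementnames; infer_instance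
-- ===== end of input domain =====

-- B computes the names in fixed-size blocks sharing one base-35 prefix per block (nested loops)
-- instead of A's flat comprehension recomputing the base conversion per element; return values proved equal.

-- ===== PORT A =====
def pvAlphabet : List Char := "0123456789ABCDEFGHIJKLMNOPQRSTUVWXYZ".toList

-- the 'while number:' loop of num2base; number is always a nonnegative int here (it comes
-- from divmod of a range element), so Nat recursion is exact
def num2baseLoop (number : Nat) (res : List Char) : List Char :=
  if number = 0 then res
  else num2baseLoop (number / 35) (res ++ [pvAlphabet.getD (number % 35) ' '])
termination_by number
decreasing_by exact Nat.div_lt_self (by omega) (by omega)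

def num2base (number : Nat) : String :=
  let r := (num2baseLoop number []).reverse   -- res[::-1]
  if r = [] then "0" else String.ofList r         -- … or "0"

def toughname (number : Int) : String :=
  let a := PySem.Int.floordiv number 100
  let b := PySem.Int.mod number 100
  PySem.Str.zfill (num2base a.toNat) 3 ++ PySem.Str.zfill (PySem.Int.toStr b) 2
  -- format(b,'02d') = str(b).zfill(2) for the nonnegative b produced here

def elementnames (nel : Int) : List String :=
  (PySem.List.pyRange 0 nel 1).map toughname

-- ===== PORT B =====
-- outer while-loop of Source B: one step per block of up to 100 names
def altOuter (a : Nat) (remaining : Nat) : List String :=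
  match remaining with
  | 0 => []
  | r + 1 =>
    let pfx := PySem.Str.zfill (num2base a) 3
    let k := min 100 (r + 1)
    ((List.range k).map (fun b => pfx ++ PySem.Str.zfill (PySem.Int.toStr (Int.ofNat b)) 2))
      ++ altOuter (a + 1) (r + 1 - k)
termination_by remaining
decreasing_by omega

def elementnames_alt (nel : Int) : List String :=
  altOuter 0 nel.toNat

-- ===== PRECONDITION & SPEC =====
def Spec_elementnames (nel : Int) (out : List String) : Prop := out = elementnames_alt nel
instance (nel : Int) (out : List String) : Decidable (Spec_elementnames nel out) := by unfold Spec_elementnames; infer_instance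

-- ===== CLAIM (what is proved, stated in full; the proofs are below) =====
def Claim_equal_elementnames : Prop := ∀ (nel : Int), Dom_elementnames nel → Spec_elementnames nel (elementnames nel)

-- ===== LEMMAS AND PROOFS =====

lemma toughname_block (a b : Nat) (hb : b < 100) :
    toughname ((100 * a + b : Nat) : Int) =
      PySem.Str.zfill (num2base a) 3 ++ PySem.Str.zfill (PySem.Int.toStr (Int.ofNat b)) 2 := by
  have hd : PySem.Int.floordiv ((100 * a + b : Nat) : Int) 100 = ((a : Nat) : Int) := by
    have := PySem.Int.floordiv_natCast (100 * a + b) 100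
    rw [show ((100:Nat):Int) = (100:Int) by norm_num] at this
    rw [this]
    congr 1
    omega
  have hm : PySem.Int.mod ((100 * a + b : Nat) : Int) 100 = ((b : Nat) : Int) := by
    have := PySem.Int.mod_natCast (100 * a + b) 100
    rw [show ((100:Nat):Int) = (100:Int) by norm_num] at this
    rw [this]
    congr 1
    omega
  simp only [toughname, hd, hm, Int.toNat_natCast, Int.ofNat_eq_natCast]

lemma altOuter_eq (r a : Nat) :
    altOuter a r = (List.range r).map (fun i => toughname ((100 * a + i : Nat) : Int)) := by
  induction r using Nat.strong_induction_on generalizing a with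
  | _ r ih =>
    match r with
    | 0 => simp [altOuter]
    | s + 1 =>
      rw [altOuter]
      by_cases h : s + 1 ≤ 100
      · have hk : min 100 (s + 1) = s + 1 := by omega
        simp only [hk, Nat.sub_self, altOuter, List.append_nil]
        exact List.map_congr_left (fun b hb => by
          rw [toughname_block a b (by simp at hb; omega)])
      · have hk : min 100 (s + 1) = 100 := by omega
        rw [hk, ih (s + 1 - 100) (by omega) (a + 1)]
        have hsplit : s + 1 = 100 + (s + 1 - 100) := by omega
        conv_rhs => rw [hsplit, List.range_add]
        rw [List.map_append, List.map_map]
        congr 1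
        · exact List.map_congr_left (fun b hb => by
            rw [toughname_block a b (by simp at hb; omega)])
        · exact List.map_congr_left (fun i _ => by
            simp only [Function.comp]
            congr 2
            omega)

-- ===== VERDICT (by name: the statement is the Claim_ definition above) =====
theorem elementnames_spec : Claim_equal_elementnames := by
  intro nel _
  unfold Spec_elementnames elementnames elementnames_alt
  rw [PySem.List.pyRange_one, altOuter_eq]
  simp only [Int.sub_zero, List.map_map]
  exact List.map_congr_left (fun k _ => by simp [Function.comp])
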